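-- pv_equiv track=rewrite | github.com/byambaa1982/categorize | main.py | checkit
-- ===== SOURCE A (Python) =====
-- yoga=['yoga', 'yin', 'vinyasa','yoga,', 'yin,', 'vinyasa,']
--
-- spa=['spa','salon','spa,','salon,']
--
-- cbd_services=['cbd services', 'cannabinoid','cbd services,', 'cannabinoid,']
--
-- acupuncture=['acupuncture', 'chinese medicine','acupuncture,', 'chinese medicine,']
--
-- biohacking=['cyrotherapy','infared','therapy','biohacking','cyrotherapy,','infared,','therapy,','biohacking,']
--
-- beauty=['beauty','facial','hair','saloon','makeup','beauty,','facial,','hair,','saloon,','makeup,']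
--
-- massage_therapy=['massage','tissue','masages','massage,','tissue,','masages,']
--
-- meditation=['meditation','meditations','meditation,','meditations,']
--
-- def checkit(x):
--   for i in x:
--     if i in beauty:
--       return 'Beauty'
--     elif i in spa:
--       return 'Spa'
--     elif i in massage_therapy:
--       return 'Massage Therapy'
--     elif i in yoga:
--       return 'Yoga'
--     elif i in cbd_services:
--       return 'CBD Service'
--     elif i in acupuncture:
--       return 'Acupuncture'
--     elif i in biohacking:
--       return 'Biohacking'
--     elif i in meditation:
--       return 'Meditation'
--     else:
--       'notype'
-- ===== SOURCE B (Python) =====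
-- # Inverted algorithm: one pass indexes the input by first-occurrence position, then we
-- # scan the fixed keyword table and return the category whose keyword occurs earliest.
-- # Correct because the eight keyword sets are pairwise disjoint and first-occurrence
-- # positions of distinct strings are distinct, so the earliest keyword occurrence is
-- # exactly the first element A's scan would match.
-- _GROUPS = [
--     (['beauty','facial','hair','saloon','makeup','beauty,','facial,','hair,','saloon,','makeup,'], 'Beauty'),
--     (['spa','salon','spa,','salon,'], 'Spa'),
--     (['massage','tissue','masages','massage,','tissue,','masages,'], 'Massage Therapy'),
--     (['yoga','yin','vinyasa','yoga,','yin,','vinyasa,'], 'Yoga'),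
--     (['cbd services','cannabinoid','cbd services,','cannabinoid,'], 'CBD Service'),
--     (['acupuncture','chinese medicine','acupuncture,','chinese medicine,'], 'Acupuncture'),
--     (['cyrotherapy','infared','therapy','biohacking','cyrotherapy,','infared,','therapy,','biohacking,'], 'Biohacking'),
--     (['meditation','meditations','meditation,','meditations,'], 'Meditation'),
-- ]
--
-- def checkit(x):
--     # stage 1: first-occurrence position of every string in the input
--     first = {}
--     for pos, s in enumerate(x):
--         if s not in first:
--             first[s] = pos
--     # stage 2: scan the keyword table for the earliest-occurring keyword
--     best_pos = None
--     best_cat = None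
--     for kws, cat in _GROUPS:
--         for k in kws:
--             p = first.get(k)
--             if p is not None and (best_pos is None or p < best_pos):
--                 best_pos = p
--                 best_cat = cat
--     return best_cat
-- ===== Notes on version B (the rewrite author's own statement) =====
-- stated objective: faster
-- what changed: Inverted the traversal: instead of scanning the input and testing each element against eight keyword lists, B first indexes the input by first-occurrence position in one pass, then scans the fixed keyword table once and returns the category of the earliest-occurring keyword (correct because the keyword sets are disjoint and first-occurrence positions of distinct strings are distinct).
import Mathlib
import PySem

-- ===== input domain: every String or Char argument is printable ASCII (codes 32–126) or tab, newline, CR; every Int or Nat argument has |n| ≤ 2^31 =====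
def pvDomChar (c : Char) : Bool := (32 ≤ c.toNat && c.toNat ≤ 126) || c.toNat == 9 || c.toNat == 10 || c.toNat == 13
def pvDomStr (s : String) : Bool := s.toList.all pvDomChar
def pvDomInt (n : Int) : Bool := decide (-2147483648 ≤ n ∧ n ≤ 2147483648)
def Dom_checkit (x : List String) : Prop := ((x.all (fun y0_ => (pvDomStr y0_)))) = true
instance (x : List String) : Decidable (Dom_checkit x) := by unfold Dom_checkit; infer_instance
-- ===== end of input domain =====

set_option maxRecDepth 8192

-- B inverts A's traversal: one pass indexes the input by first-occurrence position, then a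
-- scan over the fixed keyword table returns the category whose keyword occurs earliest
-- (alternative decomposition; same value because the keyword sets are pairwise disjoint).

-- ===== PORT A =====
def kwBeauty : List String := ["beauty", "facial", "hair", "saloon", "makeup", "beauty,", "facial,", "hair,", "saloon,", "makeup,"]
def kwSpa : List String := ["spa", "salon", "spa,", "salon,"]
def kwMassage : List String := ["massage", "tissue", "masages", "massage,", "tissue,", "masages,"]
def kwYoga : List String := ["yoga", "yin", "vinyasa", "yoga,", "yin,", "vinyasa,"]
def kwCbd : List String := ["cbd services", "cannabinoid", "cbd services,", "cannabinoid,"]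
def kwAcu : List String := ["acupuncture", "chinese medicine", "acupuncture,", "chinese medicine,"]
def kwBio : List String := ["cyrotherapy", "infared", "therapy", "biohacking", "cyrotherapy,", "infared,", "therapy,", "biohacking,"]
def kwMed : List String := ["meditation", "meditations", "meditation,", "meditations,"]

def checkit (x : List String) : Option String :=
  match x with
  | [] => none
  | i :: rest =>
    if kwBeauty.contains i then some "Beauty"
    else if kwSpa.contains i then some "Spa"
    else if kwMassage.contains i then some "Massage Therapy"
    else if kwYoga.contains i then some "Yoga"
    else if kwCbd.contains i then some "CBD Service"
    else if kwAcu.contains i then some "Acupuncture"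
    else if kwBio.contains i then some "Biohacking"
    else if kwMed.contains i then some "Meditation"
    else checkit rest      -- Python's else branch is a bare expression: the loop continues

-- ===== PORT B =====
-- Source B's _GROUPS table
def kwGroups : List (List String × String) :=
  [(kwBeauty, "Beauty"), (kwSpa, "Spa"), (kwMassage, "Massage Therapy"),
   (kwYoga, "Yoga"), (kwCbd, "CBD Service"), (kwAcu, "Acupuncture"),
   (kwBio, "Biohacking"), (kwMed, "Meditation")]

-- stage 1 of Source B: `for pos, s in enumerate(x): if s not in first: first[s] = pos`
def buildFirst : List String → Int → PySem.Dict String Int → PySem.Dict String Int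
  | [], _, d => d
  | s :: rest, pos, d =>
      buildFirst rest (pos + 1) (if d.contains s then d else d.insert s pos)

-- stage 2 of Source B, inner loop body: keep the earliest (position, category)
def bestStep (first : PySem.Dict String Int) (best : Option (Int × String))
    (k cat : String) : Option (Int × String) :=
  match first.get? k with
  | none => best
  | some p =>
    match best with
    | none => some (p, cat)
    | some (bp, bc) => if p < bp then some (p, cat) else some (bp, bc)

-- stage 2, inner loop `for k in kws`
def bestKws (first : PySem.Dict String Int) : List String → String →
    Option (Int × String) → Option (Int × String)
  | [], _, best => best
  | k :: ks, cat, best => bestKws first ks cat (bestStep first best k cat)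

-- stage 2, outer loop `for kws, cat in _GROUPS`
def bestGroups (first : PySem.Dict String Int) : List (List String × String) →
    Option (Int × String) → Option (Int × String)
  | [], best => best
  | (kws, cat) :: rest, best => bestGroups first rest (bestKws first kws cat best)

def checkit_alt (x : List String) : Option String :=
  match bestGroups (buildFirst x 0 PySem.Dict.empty) kwGroups none with
  | some (_, cat) => some cat
  | none => none

-- ===== PRECONDITION & SPEC =====
def Spec_checkit (x : List String) (out : Option String) : Prop := out = checkit_alt x
instance (x : List String) (out : Option String) : Decidable (Spec_checkit x out) := by unfold Spec_checkit; infer_instance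

-- ===== CLAIM (what is proved, stated in full; the proofs are below) =====
def Claim_equal_checkit : Prop := ∀ (x : List String), Dom_checkit x → Spec_checkit x (checkit x)

-- ===== LEMMAS AND PROOFS =====
-- the keyword table flattened, and the keyword→category map
def kwPairs : List (String × String) := [("beauty", "Beauty"), ("facial", "Beauty"), ("hair", "Beauty"), ("saloon", "Beauty"), ("makeup", "Beauty"), ("beauty,", "Beauty"), ("facial,", "Beauty"), ("hair,", "Beauty"), ("saloon,", "Beauty"), ("makeup,", "Beauty"), ("spa", "Spa"), ("salon", "Spa"), ("spa,", "Spa"), ("salon,", "Spa"), ("massage", "Massage Therapy"), ("tissue", "Massage Therapy"), ("masages", "Massage Therapy"), ("massage,", "Massage Therapy"), ("tissue,", "Massage Therapy"), ("masages,", "Massage Therapy"), ("yoga", "Yoga"), ("yin", "Yoga"), ("vinyasa", "Yoga"), ("yoga,", "Yoga"), ("yin,", "Yoga"), ("vinyasa,", "Yoga"), ("cbd services", "CBD Service"), ("cannabinoid", "CBD Service"), ("cbd services,", "CBD Service"), ("cannabinoid,", "CBD Service"), ("acupuncture", "Acupuncture"), ("chinese medicine", "Acupuncture"), ("acupuncture,",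 "Acupuncture"), ("chinese medicine,", "Acupuncture"), ("cyrotherapy", "Biohacking"), ("infared", "Biohacking"), ("therapy", "Biohacking"), ("biohacking", "Biohacking"), ("cyrotherapy,", "Biohacking"), ("infared,", "Biohacking"), ("therapy,", "Biohacking"), ("biohacking,", "Biohacking"), ("meditation", "Meditation"), ("meditations", "Meditation"), ("meditation,", "Meditation"), ("meditations,", "Meditation")]

def kwTable : PySem.Dict String String := PySem.Dict.mk kwPairs

def isKw (s : String) : Bool := (kwTable.get? s).isSome

-- the first keyword of the input (what A returns the category of)
def firstKw : List String → Option String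
  | [] => none
  | s :: rest => if isKw s then some s else firstKw rest

-- first-occurrence index of a string in the input
def firstPos : List String → String → Option Nat
  | [], _ => none
  | s :: rest, k => if s = k then some 0 else (firstPos rest k).map (· + 1)

def specFn (x : List String) : Option String :=
  match firstKw x with
  | some s => kwTable.get? s
  | none => none

theorem kwPairs_nodup_keys : kwTable.keys.Nodup := by decide

theorem kwGroups_flatten :
    kwGroups.flatMap (fun g => g.1.map (fun k => (k, g.2))) = kwPairs := by decide

-- ---- A side ----
theorem lookup_kwBeauty (i : String) (h : kwBeauty.contains i = true) : kwTable.get? i = some "Beauty" := by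
  simp [kwBeauty] at h
  rcases h with rfl | rfl | rfl | rfl | rfl | rfl | rfl | rfl | rfl | rfl <;> decide
theorem lookup_kwSpa (i : String) (h : kwSpa.contains i = true) : kwTable.get? i = some "Spa" := by
  simp [kwSpa] at h
  rcases h with rfl | rfl | rfl | rfl <;> decide
theorem lookup_kwMassage (i : String) (h : kwMassage.contains i = true) : kwTable.get? i = some "Massage Therapy" := by
  simp [kwMassage] at h
  rcases h with rfl | rfl | rfl | rfl | rfl | rfl <;> decide
theorem lookup_kwYoga (i : String) (h : kwYoga.contains i = true) : kwTable.get? i = some "Yoga" := by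
  simp [kwYoga] at h
  rcases h with rfl | rfl | rfl | rfl | rfl | rfl <;> decide
theorem lookup_kwCbd (i : String) (h : kwCbd.contains i = true) : kwTable.get? i = some "CBD Service" := by
  simp [kwCbd] at h
  rcases h with rfl | rfl | rfl | rfl <;> decide
theorem lookup_kwAcu (i : String) (h : kwAcu.contains i = true) : kwTable.get? i = some "Acupuncture" := by
  simp [kwAcu] at h
  rcases h with rfl | rfl | rfl | rfl <;> decide
theorem lookup_kwBio (i : String) (h : kwBio.contains i = true) : kwTable.get? i = some "Biohacking" := by
  simp [kwBio] at h
  rcases h with rfl | rfl | rfl | rfl | rfl | rfl | rfl | rfl <;> decide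
theorem lookup_kwMed (i : String) (h : kwMed.contains i = true) : kwTable.get? i = some "Meditation" := by
  simp [kwMed] at h
  rcases h with rfl | rfl | rfl | rfl <;> decide

theorem lookup_none (i : String)
    (h1 : ¬ kwBeauty.contains i = true) (h2 : ¬ kwSpa.contains i = true)
    (h3 : ¬ kwMassage.contains i = true) (h4 : ¬ kwYoga.contains i = true)
    (h5 : ¬ kwCbd.contains i = true) (h6 : ¬ kwAcu.contains i = true)
    (h7 : ¬ kwBio.contains i = true) (h8 : ¬ kwMed.contains i = true) :
    kwTable.get? i = none := by
  simp [kwBeauty] at h1; simp [kwSpa] at h2; simp [kwMassage] at h3; simp [kwYoga] at h4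
  simp [kwCbd] at h5; simp [kwAcu] at h6; simp [kwBio] at h7; simp [kwMed] at h8
  rw [kwTable, kwPairs]
  simp [PySem.Dict.get?,
    Ne.symm h1.1, Ne.symm h1.2.1, Ne.symm h1.2.2.1, Ne.symm h1.2.2.2.1, Ne.symm h1.2.2.2.2.1, Ne.symm h1.2.2.2.2.2.1, Ne.symm h1.2.2.2.2.2.2.1, Ne.symm h1.2.2.2.2.2.2.2.1, Ne.symm h1.2.2.2.2.2.2.2.2.1, Ne.symm h1.2.2.2.2.2.2.2.2.2, Ne.symm h2.1, Ne.symm h2.2.1, Ne.symm h2.2.2.1, Ne.symm h2.2.2.2, Ne.symm h3.1, Ne.symm h3.2.1, Ne.symm h3.2.2.1, Ne.symm h3.2.2.2.1, Ne.symm h3.2.2.2.2.1, Ne.symm h3.2.2.2.2.2, Ne.symm h4.1, Ne.symm h4.2.1, Ne.symm h4.2.2.1, Ne.symm h4.2.2.2.1, Ne.symm h4.2.2.2.2.1, Ne.symm h4.2.2.2.2.2, Ne.symm h5.1, Ne.symm h5.2.1, Ne.symm h5.2.2.1, Ne.symm h5.2.2.2, Ne.symm h6.1, Ne.symm h6.2.1,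 Ne.symm h6.2.2.1, Ne.symm h6.2.2.2, Ne.symm h7.1, Ne.symm h7.2.1, Ne.symm h7.2.2.1, Ne.symm h7.2.2.2.1, Ne.symm h7.2.2.2.2.1, Ne.symm h7.2.2.2.2.2.1, Ne.symm h7.2.2.2.2.2.2.1, Ne.symm h7.2.2.2.2.2.2.2, Ne.symm h8.1, Ne.symm h8.2.1, Ne.symm h8.2.2.1, Ne.symm h8.2.2.2]

theorem step_eq (i : String) (e : Option String) :
    (if kwBeauty.contains i then some "Beauty"
     else if kwSpa.contains i then some "Spa"
     else if kwMassage.contains i then some "Massage Therapy"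
     else if kwYoga.contains i then some "Yoga"
     else if kwCbd.contains i then some "CBD Service"
     else if kwAcu.contains i then some "Acupuncture"
     else if kwBio.contains i then some "Biohacking"
     else if kwMed.contains i then some "Meditation"
     else e) =
    (match kwTable.get? i with
     | some cat => some cat
     | none => e) := by
  by_cases h1 : i ∈ kwBeauty
  · simp [h1, lookup_kwBeauty i (by simpa using h1)]
  by_cases h2 : i ∈ kwSpa
  · simp [h1, h2, lookup_kwSpa i (by simpa using h2)]
  by_cases h3 : i ∈ kwMassage
  · simp [h1, h2, h3, lookup_kwMassage i (by simpa using h3)]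
  by_cases h4 : i ∈ kwYoga
  · simp [h1, h2, h3, h4, lookup_kwYoga i (by simpa using h4)]
  by_cases h5 : i ∈ kwCbd
  · simp [h1, h2, h3, h4, h5, lookup_kwCbd i (by simpa using h5)]
  by_cases h6 : i ∈ kwAcu
  · simp [h1, h2, h3, h4, h5, h6, lookup_kwAcu i (by simpa using h6)]
  by_cases h7 : i ∈ kwBio
  · simp [h1, h2, h3, h4, h5, h6, h7, lookup_kwBio i (by simpa using h7)]
  by_cases h8 : i ∈ kwMed
  · simp [h1, h2, h3, h4, h5, h6, h7, h8, lookup_kwMed i (by simpa using h8)]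
  · simp [h1, h2, h3, h4, h5, h6, h7, h8, lookup_none i (by simpa using h1) (by simpa using h2) (by simpa using h3) (by simpa using h4) (by simpa using h5) (by simpa using h6) (by simpa using h7) (by simpa using h8)]

theorem checkit_eq_spec (x : List String) : checkit x = specFn x := by
  induction x with
  | nil => rfl
  | cons i rest ih =>
    rw [checkit, step_eq i (checkit rest), ih]
    simp only [specFn, firstKw, isKw]
    by_cases h : (kwTable.get? i).isSome = true
    · obtain ⟨c, hc⟩ := Option.isSome_iff_exists.mp h
      simp [hc]
    · have hc : kwTable.get? i = none := Option.not_isSome_iff_eq_none.mp (by simpa using h)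
      simp [hc]

-- ---- B side ----
theorem buildFirst_get? (x : List String) : ∀ (pos : Int) (d : PySem.Dict String Int) (k : String),
    (buildFirst x pos d).get? k =
      match d.get? k with
      | some v => some v
      | none => (firstPos x k).map (fun n => pos + (n : Int)) := by
  induction x with
  | nil => intro pos d k; simp [buildFirst, firstPos]; cases d.get? k <;> simp
  | cons s rest ih =>
    intro pos d k
    rw [buildFirst, ih]
    by_cases hs : s = k
    · subst hs
      by_cases hc : d.contains s = true
      · rw [if_pos hc]
        have : (d.get? s).isSome := by rw [← PySem.Dict.contains_eq_isSome_get?]; exact hc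
        cases h : d.get? s with
        | none => rw [h] at this; simp at this
        | some v => simp
      · rw [if_neg hc]
        have h0 : d.get? s = none := by
          cases h : d.get? s with
          | none => rfl
          | some v =>
            have : d.contains s = (d.get? s).isSome := PySem.Dict.contains_eq_isSome_get? ..
            rw [h] at this; simp at this; exact absurd this hc
        simp [PySem.Dict.get?_insert_self, h0, firstPos]
    · have hd : (if d.contains s then d else d.insert s pos).get? k = d.get? k := by
        split
        · rfl
        · exact PySem.Dict.get?_insert_of_ne _ _ (Ne.symm hs)
      rw [hd]
      cases h : d.get? k with
      | some v => simp
      | none =>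
        simp only [firstPos, if_neg hs]
        cases hp : firstPos rest k with
        | none => simp
        | some n => simp; omega

theorem firstPos_of_not_mem (x : List String) (k : String) (h : k ∉ x) : firstPos x k = none := by
  induction x with
  | nil => rfl
  | cons s rest ih =>
    simp at h
    simp [firstPos, Ne.symm h.1, ih h.2]

theorem firstKw_none_not_mem (x : List String) (h : firstKw x = none) :
    ∀ k, isKw k = true → k ∉ x := by
  induction x with
  | nil => intro k _; simp
  | cons s rest ih =>
    rw [firstKw] at h
    by_cases hs : isKw s = true
    · simp [hs] at h
    · simp [hs] at h
      intro k hk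
      simp
      constructor
      · intro he; subst he; exact hs hk
      · exact ih h k hk

theorem firstKw_isKw (x : List String) (s : String) (h : firstKw x = some s) : isKw s = true := by
  induction x with
  | nil => simp [firstKw] at h
  | cons a rest ih =>
    rw [firstKw] at h
    by_cases ha : isKw a = true
    · simp [ha] at h; subst h; exact ha
    · simp [ha] at h; exact ih h

theorem key_min (x : List String) (s : String) (h : firstKw x = some s) :
    ∃ j : Nat, firstPos x s = some j ∧
      ∀ k m, isKw k = true → firstPos x k = some m → j ≤ m ∧ (m = j → k = s) := by
  induction x generalizing s with
  | nil => simp [firstKw] at h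
  | cons a rest ih =>
    rw [firstKw] at h
    by_cases ha : isKw a = true
    · simp [ha] at h; subst h
      refine ⟨0, by simp [firstPos], ?_⟩
      intro k m _ hm
      by_cases hk : a = k
      · subst hk; exact ⟨Nat.zero_le m, fun _ => rfl⟩
      · simp [firstPos, hk] at hm
        obtain ⟨m', _, hm'⟩ := hm
        exact ⟨by omega, fun h1 => absurd h1 (by omega)⟩
    · simp [ha] at h
      obtain ⟨j, hj, hmin⟩ := ih s h
      have hs : isKw s = true := firstKw_isKw rest s h
      have has : a ≠ s := fun he => ha (he ▸ hs)
      refine ⟨j + 1, by simp [firstPos, has, hj], ?_⟩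
      intro k m hk hm
      have hak : a ≠ k := fun he => ha (he ▸ hk)
      simp [firstPos, hak] at hm
      obtain ⟨m', hm', he⟩ := hm
      have := hmin k m' hk hm'
      constructor
      · omega
      · intro h1
        exact this.2 (by omega)

theorem bestKws_eq_foldl (first : PySem.Dict String Int) (kws : List String) (cat : String)
    (b : Option (Int × String)) :
    bestKws first kws cat b = kws.foldl (fun b k => bestStep first b k cat) b := by
  induction kws generalizing b with
  | nil => rfl
  | cons k ks ih => rw [bestKws, ih, List.foldl_cons]

theorem bestGroups_eq_flat (first : PySem.Dict String Int) (L : List (List String × String))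
    (b : Option (Int × String)) :
    bestGroups first L b =
      (L.flatMap (fun g => g.1.map (fun k => (k, g.2)))).foldl
        (fun b p => bestStep first b p.1 p.2) b := by
  induction L generalizing b with
  | nil => rfl
  | cons g rest ih =>
    obtain ⟨kws, cat⟩ := g
    rw [bestGroups, ih, List.flatMap_cons, List.foldl_append, bestKws_eq_foldl]
    congr 1
    rw [List.foldl_map]

theorem bestFlat_none (first : PySem.Dict String Int) (L : List (String × String))
    (b : Option (Int × String)) (h : ∀ p ∈ L, first.get? p.1 = none) :
    L.foldl (fun b p => bestStep first b p.1 p.2) b = b := by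
  induction L generalizing b with
  | nil => rfl
  | cons p rest ih =>
    rw [List.foldl_cons]
    have hp : first.get? p.1 = none := h p (by simp)
    rw [show bestStep first b p.1 p.2 = b by rw [bestStep, hp]]
    exact ih b (fun q hq => h q (by simp [hq]))

theorem bestFlat_min (first : PySem.Dict String Int) (L : List (String × String))
    (j : Int) (cs : String) :
    ∀ (b : Option (Int × String)),
    (∀ p ∈ L, ∀ q, first.get? p.1 = some q → j ≤ q ∧ (q = j → p.2 = cs)) →
    (b = none ∨ ∃ bp bc, b = some (bp, bc) ∧ j ≤ bp ∧ (bp = j → bc = cs)) →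
    ((∃ p ∈ L, first.get? p.1 = some j) ∨ b = some (j, cs)) →
    L.foldl (fun b p => bestStep first b p.1 p.2) b = some (j, cs) := by
  induction L with
  | nil =>
    intro b _ _ hex
    rcases hex with ⟨p, hp, _⟩ | hb
    · simp at hp
    · simpa using hb
  | cons p rest ih =>
    intro b hall hb hex
    rw [List.foldl_cons]
    have hall' : ∀ q ∈ rest, ∀ r, first.get? q.1 = some r → j ≤ r ∧ (r = j → q.2 = cs) :=
      fun q hq => hall q (by simp [hq])
    cases hp : first.get? p.1 with
    | none =>
      have hstep : bestStep first b p.1 p.2 = b := by rw [bestStep, hp]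
      rw [hstep]
      refine ih b hall' hb ?_
      rcases hex with ⟨q, hq, hr⟩ | hbeq
      · rcases List.mem_cons.mp hq with he | hm
        · subst he; rw [hp] at hr; exact absurd hr (by simp)
        · exact Or.inl ⟨q, hm, hr⟩
      · exact Or.inr hbeq
    | some q =>
      have hpq := hall p (by simp) q hp
      rcases hb with hbn | ⟨bp, bc, hbe, hjbp, hbpj⟩
      · subst hbn
        have hstep : bestStep first none p.1 p.2 = some (q, p.2) := by rw [bestStep, hp]
        rw [hstep]
        by_cases hqj : q = j
        · subst hqj
          exact ih _ hall' (Or.inr ⟨q, p.2, rfl, le_refl _, fun _ => hpq.2 rfl⟩)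
            (Or.inr (by rw [hpq.2 rfl]))
        · refine ih _ hall' (Or.inr ⟨q, p.2, rfl, hpq.1, fun h => absurd h hqj⟩) ?_
          rcases hex with ⟨r, hr, hrr⟩ | hbeq
          · rcases List.mem_cons.mp hr with he | hm
            · subst he; rw [hp] at hrr
              exact absurd (Option.some.inj hrr) hqj
            · exact Or.inl ⟨r, hm, hrr⟩
          · simp at hbeq
      · subst hbe
        by_cases hlt : q < bp
        · have hstep : bestStep first (some (bp, bc)) p.1 p.2 = some (q, p.2) := by
            rw [bestStep, hp]; simp [hlt]
          rw [hstep]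
          by_cases hqj : q = j
          · subst hqj
            exact ih _ hall' (Or.inr ⟨q, p.2, rfl, le_refl _, fun _ => hpq.2 rfl⟩)
              (Or.inr (by rw [hpq.2 rfl]))
          · refine ih _ hall' (Or.inr ⟨q, p.2, rfl, hpq.1, fun h => absurd h hqj⟩) ?_
            rcases hex with ⟨r, hr, hrr⟩ | hbeq
            · rcases List.mem_cons.mp hr with he | hm
              · subst he; rw [hp] at hrr
                exact absurd (Option.some.inj hrr) hqj
              · exact Or.inl ⟨r, hm, hrr⟩
            · have h1 : bp = j ∧ bc = cs := by simpa using hbeq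
              omega
        · have hstep : bestStep first (some (bp, bc)) p.1 p.2 = some (bp, bc) := by
            rw [bestStep, hp]; simp [hlt]
          rw [hstep]
          refine ih _ hall' (Or.inr ⟨bp, bc, rfl, hjbp, hbpj⟩) ?_
          rcases hex with ⟨r, hr, hrr⟩ | hbeq
          · rcases List.mem_cons.mp hr with he | hm
            · subst he; rw [hp] at hrr
              have hqj : q = j := Option.some.inj hrr
              have hbpj' : bp = j := by omega
              rw [hbpj', hbpj hbpj']
              exact Or.inr rfl
            · exact Or.inl ⟨r, hm, hrr⟩
          · exact Or.inr hbeq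

theorem mem_kwPairs_isKw (p : String × String) (hp : p ∈ kwPairs) : kwTable.get? p.1 = some p.2 :=
  PySem.Dict.get?_of_mem_items _ hp kwPairs_nodup_keys

theorem checkit_alt_eq_spec (x : List String) : checkit_alt x = specFn x := by
  rw [checkit_alt, bestGroups_eq_flat, kwGroups_flatten]
  have hget : ∀ k, (buildFirst x 0 PySem.Dict.empty).get? k
      = (firstPos x k).map (fun n => (n : Int)) := by
    intro k
    rw [buildFirst_get? x 0 PySem.Dict.empty k]
    simp [PySem.Dict.get?_empty]
  cases hfk : firstKw x with
  | none =>
    rw [bestFlat_none]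
    · simp [specFn, hfk]
    · intro p hp
      rw [hget]
      have : p.1 ∉ x := firstKw_none_not_mem x hfk p.1
        (by simp [isKw, mem_kwPairs_isKw p hp])
      rw [firstPos_of_not_mem x p.1 this]; rfl
  | some s =>
    obtain ⟨j, hj, hmin⟩ := key_min x s hfk
    have hs : isKw s = true := firstKw_isKw x s hfk
    obtain ⟨cs, hcs⟩ : ∃ cs, kwTable.get? s = some cs := by
      simp [isKw] at hs; exact Option.isSome_iff_exists.mp hs
    have hmem : (s, cs) ∈ kwPairs := PySem.Dict.mem_items_of_get?_eq_some _ hcs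
    rw [bestFlat_min (buildFirst x 0 PySem.Dict.empty) kwPairs ((j : Nat) : Int) cs none]
    · simp [specFn, hfk, hcs]
    · intro p hp q hq
      rw [hget] at hq
      cases hm : firstPos x p.1 with
      | none => rw [hm] at hq; simp at hq
      | some m =>
        rw [hm] at hq; simp at hq
        have hk : isKw p.1 = true := by simp [isKw, mem_kwPairs_isKw p hp]
        have := hmin p.1 m hk hm
        constructor
        · omega
        · intro h1
          have hm' : m = j := by omega
          have hps : p.1 = s := this.2 hm'
          have : kwTable.get? p.1 = some p.2 := mem_kwPairs_isKw p hp
          rw [hps, hcs] at this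
          exact (Option.some.inj this).symm
    · exact Or.inl rfl
    · exact Or.inl ⟨(s, cs), hmem, by rw [hget, hj]; rfl⟩

-- ===== VERDICT (by name: the statement is the Claim_ definition above) =====
theorem checkit_spec : Claim_equal_checkit := by
  intro x _
  show checkit x = checkit_alt x
  rw [checkit_eq_spec, checkit_alt_eq_spec]
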